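-- pv_equiv track=rewrite | github.com/SeSAC-DA1/DATA-PIPELINE | crawler/inspection_mapping.py | normalize_damage_types
-- ===== SOURCE A (Python) =====
-- DAMAGE_TYPE_MAPPING = {
--     'X': 'exchanged',    # 교환
--     'W': 'welded',       # 판금 또는 용접
--     'A': 'scratched',    # 흠집
--     'U': 'uneven',       # 요철
--     'C': 'corroded',     # 부식
--     'T': 'damaged',      # 손상
-- }
--
-- def normalize_damage_types(status_codes: list) -> dict:
--     """
--     손상 유형 코드들을 Boolean 플래그로 변환 (OUTER 전용)
--
--     Args:
--         status_codes: ['X', '4', 'C'] 등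
--
--     Returns:
--         dict: {'exchanged': True, 'scratched': True, 'corroded': True}
--     """
--     result = {
--         'exchanged': False,
--         'welded': False,
--         'scratched': False,
--         'uneven': False,
--         'corroded': False,
--         'damaged': False,
--     }
--
--     for code in status_codes:
--         damage_type = DAMAGE_TYPE_MAPPING.get(code)
--         if damage_type:
--             result[damage_type] = True
--
--     return result
-- ===== SOURCE B (Python) =====
-- DAMAGE_TYPE_MAPPING = {
--     'X': 'exchanged',    # 교환
--     'W': 'welded',       # 판금 또는 용접
--     'A': 'scratched',    # 흠집
--     'U': 'uneven',       # 요철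
--     'C': 'corroded',     # 부식
--     'T': 'damaged',      # 손상
-- }
--
-- def normalize_damage_types(status_codes: list) -> dict:
--     present = set(status_codes)
--     return {name: code in present for code, name in DAMAGE_TYPE_MAPPING.items()}
-- ===== Notes on version B (the rewrite author's own statement) =====
-- stated objective: idiomatic
-- what changed: B inverts the driving loop: instead of iterating over the input and mutating pre-initialised flags via mapping.get, it builds a set of the input codes once and constructs the result directly by a comprehension over the fixed 6-entry mapping, testing membership.
import Mathlib
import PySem

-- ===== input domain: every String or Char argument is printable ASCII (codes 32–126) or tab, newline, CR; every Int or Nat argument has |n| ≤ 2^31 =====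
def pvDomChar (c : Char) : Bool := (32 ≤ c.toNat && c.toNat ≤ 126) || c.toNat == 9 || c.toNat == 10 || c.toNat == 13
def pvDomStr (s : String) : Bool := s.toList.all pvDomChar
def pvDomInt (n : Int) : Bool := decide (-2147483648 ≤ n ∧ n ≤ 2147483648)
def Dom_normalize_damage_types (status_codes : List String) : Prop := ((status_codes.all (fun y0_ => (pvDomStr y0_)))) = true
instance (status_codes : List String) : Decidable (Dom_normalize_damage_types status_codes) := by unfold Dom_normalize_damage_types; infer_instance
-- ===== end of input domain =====

-- B replaces A's input-driven loop with in-place flag mutation by a single comprehension over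
-- the fixed 6-entry mapping, testing membership in a set of the input codes (objective: idiomatic).

-- ===== PORT A =====
def DAMAGE_TYPE_MAPPING : PySem.Dict String String :=
  PySem.Dict.ofList [("X", "exchanged"), ("W", "welded"), ("A", "scratched"),
                     ("U", "uneven"), ("C", "corroded"), ("T", "damaged")]

-- body of A's 'for code in status_codes' loop (truthiness of the looked-up string = nonempty)
def pvStepA (r : PySem.Dict String Bool) (code : String) : PySem.Dict String Bool :=
  match DAMAGE_TYPE_MAPPING.get? code with
  | some damage_type => if damage_type ≠ "" then r.insert damage_type true else r
  | none => r

def normalize_damage_types (status_codes : List String) : List (String × Bool) :=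
  let result : PySem.Dict String Bool :=
    PySem.Dict.ofList [("exchanged", false), ("welded", false), ("scratched", false),
                       ("uneven", false), ("corroded", false), ("damaged", false)]
  (status_codes.foldl pvStepA result).items

-- ===== PORT B =====
def normalize_damage_types_alt (status_codes : List String) : List (String × Bool) :=
  let present : PySem.Set String := PySem.Set.ofList status_codes
  (DAMAGE_TYPE_MAPPING.items.foldl
    (fun d p => d.insert p.2 (present.contains p.1)) PySem.Dict.empty).items

-- ===== PRECONDITION & SPEC =====
def Spec_normalize_damage_types (status_codes : List String) (out : List (String × Bool)) : Prop := out = normalize_damage_types_alt status_codes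
instance (status_codes : List String) (out : List (String × Bool)) : Decidable (Spec_normalize_damage_types status_codes out) := by unfold Spec_normalize_damage_types; infer_instance

-- ===== CLAIM (what is proved, stated in full; the proofs are below) =====
def Claim_equal_normalize_damage_types : Prop := ∀ (status_codes : List String), Dom_normalize_damage_types status_codes → Spec_normalize_damage_types status_codes (normalize_damage_types status_codes)

-- ===== LEMMAS AND PROOFS =====

lemma mapping_eq : DAMAGE_TYPE_MAPPING =
    PySem.Dict.mk [("X", "exchanged"), ("W", "welded"), ("A", "scratched"),
                   ("U", "uneven"), ("C", "corroded"), ("T", "damaged")] := rfl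

lemma step_X (b1 b2 b3 b4 b5 b6 : Bool) :
    pvStepA (PySem.Dict.mk [("exchanged", b1), ("welded", b2), ("scratched", b3),
                      ("uneven", b4), ("corroded", b5), ("damaged", b6)]) "X" =
    PySem.Dict.mk [("exchanged", true), ("welded", b2), ("scratched", b3),
                      ("uneven", b4), ("corroded", b5), ("damaged", b6)] := rfl

lemma step_W (b1 b2 b3 b4 b5 b6 : Bool) :
    pvStepA (PySem.Dict.mk [("exchanged", b1), ("welded", b2), ("scratched", b3),
                      ("uneven", b4), ("corroded", b5), ("damaged", b6)]) "W" =
    PySem.Dict.mk [("exchanged", b1), ("welded", true), ("scratched", b3),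
                      ("uneven", b4), ("corroded", b5), ("damaged", b6)] := rfl

lemma step_A (b1 b2 b3 b4 b5 b6 : Bool) :
    pvStepA (PySem.Dict.mk [("exchanged", b1), ("welded", b2), ("scratched", b3),
                      ("uneven", b4), ("corroded", b5), ("damaged", b6)]) "A" =
    PySem.Dict.mk [("exchanged", b1), ("welded", b2), ("scratched", true),
                      ("uneven", b4), ("corroded", b5), ("damaged", b6)] := rfl

lemma step_U (b1 b2 b3 b4 b5 b6 : Bool) :
    pvStepA (PySem.Dict.mk [("exchanged", b1), ("welded", b2), ("scratched", b3),
                      ("uneven", b4), ("corroded", b5), ("damaged", b6)]) "U" =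
    PySem.Dict.mk [("exchanged", b1), ("welded", b2), ("scratched", b3),
                      ("uneven", true), ("corroded", b5), ("damaged", b6)] := rfl

lemma step_C (b1 b2 b3 b4 b5 b6 : Bool) :
    pvStepA (PySem.Dict.mk [("exchanged", b1), ("welded", b2), ("scratched", b3),
                      ("uneven", b4), ("corroded", b5), ("damaged", b6)]) "C" =
    PySem.Dict.mk [("exchanged", b1), ("welded", b2), ("scratched", b3),
                      ("uneven", b4), ("corroded", true), ("damaged", b6)] := rfl

lemma step_T (b1 b2 b3 b4 b5 b6 : Bool) :
    pvStepA (PySem.Dict.mk [("exchanged", b1), ("welded", b2), ("scratched", b3),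
                      ("uneven", b4), ("corroded", b5), ("damaged", b6)]) "T" =
    PySem.Dict.mk [("exchanged", b1), ("welded", b2), ("scratched", b3),
                      ("uneven", b4), ("corroded", b5), ("damaged", true)] := rfl

lemma step_none (b1 b2 b3 b4 b5 b6 : Bool) (c : String) (h1 : c ≠ "X") (h2 : c ≠ "W")
    (h3 : c ≠ "A") (h4 : c ≠ "U") (h5 : c ≠ "C") (h6 : c ≠ "T") :
    pvStepA (PySem.Dict.mk [("exchanged", b1), ("welded", b2), ("scratched", b3),
                      ("uneven", b4), ("corroded", b5), ("damaged", b6)]) c =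
    PySem.Dict.mk [("exchanged", b1), ("welded", b2), ("scratched", b3),
                      ("uneven", b4), ("corroded", b5), ("damaged", b6)] := by
  have hg : DAMAGE_TYPE_MAPPING.get? c = none := by
    simp [mapping_eq, beq_iff_eq, Ne.symm h1, Ne.symm h2, Ne.symm h3, Ne.symm h4, Ne.symm h5,
          Ne.symm h6, PySem.Dict.get?]
  simp [pvStepA, hg]

-- Invariant of A's loop: starting from any flag values, the final flag of each damage
-- name is the initial one OR'ed with "its code occurs in the remaining input".
lemma foldA_flags (codes : List String) (b1 b2 b3 b4 b5 b6 : Bool) :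
    codes.foldl pvStepA
      (PySem.Dict.mk [("exchanged", b1), ("welded", b2), ("scratched", b3),
                      ("uneven", b4), ("corroded", b5), ("damaged", b6)]) =
    PySem.Dict.mk [("exchanged", b1 || codes.contains "X"),
                   ("welded", b2 || codes.contains "W"),
                   ("scratched", b3 || codes.contains "A"),
                   ("uneven", b4 || codes.contains "U"),
                   ("corroded", b5 || codes.contains "C"),
                   ("damaged", b6 || codes.contains "T")] := by
  induction codes generalizing b1 b2 b3 b4 b5 b6 with
  | nil => simp
  | cons c cs ih =>
    simp only [List.foldl_cons]
    by_cases h1 : c = "X"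
    · subst h1; rw [step_X, ih]; simp
    · by_cases h2 : c = "W"
      · subst h2; rw [step_W, ih]; simp
      · by_cases h3 : c = "A"
        · subst h3; rw [step_A, ih]; simp
        · by_cases h4 : c = "U"
          · subst h4; rw [step_U, ih]; simp
          · by_cases h5 : c = "C"
            · subst h5; rw [step_C, ih]; simp
            · by_cases h6 : c = "T"
              · subst h6; rw [step_T, ih]; simp
              · rw [step_none b1 b2 b3 b4 b5 b6 c h1 h2 h3 h4 h5 h6, ih]
                simp [Ne.symm h1, Ne.symm h2, Ne.symm h3, Ne.symm h4, Ne.symm h5, Ne.symm h6]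

-- B's comprehension over the 6 fixed, distinct keys, written out entry by entry.
lemma alt_eq (codes : List String) : normalize_damage_types_alt codes =
    [("exchanged", PySem.Set.contains (PySem.Set.ofList codes) "X"),
     ("welded", PySem.Set.contains (PySem.Set.ofList codes) "W"),
     ("scratched", PySem.Set.contains (PySem.Set.ofList codes) "A"),
     ("uneven", PySem.Set.contains (PySem.Set.ofList codes) "U"),
     ("corroded", PySem.Set.contains (PySem.Set.ofList codes) "C"),
     ("damaged", PySem.Set.contains (PySem.Set.ofList codes) "T")] := rfl

-- ===== VERDICT (by name: the statement is the Claim_ definition above) =====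
theorem normalize_damage_types_spec : Claim_equal_normalize_damage_types := by
  intro codes _
  unfold Spec_normalize_damage_types
  show (List.foldl pvStepA
      (PySem.Dict.mk [("exchanged", false), ("welded", false), ("scratched", false),
        ("uneven", false), ("corroded", false), ("damaged", false)]) codes).items =
    normalize_damage_types_alt codes
  rw [foldA_flags, alt_eq]
  simp
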